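-- pv_equiv track=rewrite | github.com/NatanVW/ETF2LScripts | ProvTiersAuto/ProvTiersBase.py | getTeamIDList
-- ===== SOURCE A (Python) =====
-- def getKeysByValue(dictOfElements, valueToFind):
--     listOfKeys = []
--     listOfItems = dictOfElements.items()
--     for item in listOfItems:
--         if item[1] == valueToFind:
--             listOfKeys.append(item[0])
--
--     return listOfKeys
--
-- def getTeamIDList(teamDict):
--     prem = getKeysByValue(teamDict, "Premiership")
--     high = getKeysByValue(teamDict, "High")
--     mid = getKeysByValue(teamDict, "Mid")
--     low = getKeysByValue(teamDict, "Low")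
--     open = getKeysByValue(teamDict, "Open")
--     none = getKeysByValue(teamDict, "")
--
--     teamIDList = []
--     counterDict = {}
--
--     if prem != []:
--         for ID in prem:
--             teamIDList.append(ID)
--         update = {"Premiership": len(prem)}
--         counterDict.update(update)
--
--     if high != []:
--         for ID in high:
--             teamIDList.append(ID)
--         update = {"High": len(high)}
--         counterDict.update(update)
--
--     if mid != []:
--         for ID in mid:
--             teamIDList.append(ID)
--         update = {"Mid": len(mid)}
--         counterDict.update(update)
--
--     if low != []:
--         for ID in low:
--             teamIDList.append(ID)
--         update = {"Low": len(low)}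
--         counterDict.update(update)
--
--     if open != []:
--         for ID in open:
--             teamIDList.append(ID)
--         update = {"Open": len(open)}
--         counterDict.update(update)
--
--     if none != []:
--         for ID in none:
--             teamIDList.append(ID)
--
--     return teamIDList, counterDict
-- ===== SOURCE B (Python) =====
-- def getTeamIDList(teamDict):
--     order = ["Premiership", "High", "Mid", "Low", "Open"]
--     buckets = {t: [] for t in order + [""]}
--     for ID, tier in teamDict.items():
--         b = buckets.get(tier)
--         if b is not None:
--             b.append(ID)
--     teamIDList = [ID for t in order for ID in buckets[t]] + buckets[""]
--     counterDict = {t: len(buckets[t]) for t in order if buckets[t]}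
--     return teamIDList, counterDict
-- ===== Notes on version B (the rewrite author's own statement) =====
-- stated objective: simpler
-- what changed: Replaces A's six separate filter-scans of the dict (one per tier via getKeysByValue) with a single grouping pass that buckets each key by its tier, then assembles the ID list and non-empty-tier counts from the buckets in the fixed tier order.
import Mathlib
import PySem

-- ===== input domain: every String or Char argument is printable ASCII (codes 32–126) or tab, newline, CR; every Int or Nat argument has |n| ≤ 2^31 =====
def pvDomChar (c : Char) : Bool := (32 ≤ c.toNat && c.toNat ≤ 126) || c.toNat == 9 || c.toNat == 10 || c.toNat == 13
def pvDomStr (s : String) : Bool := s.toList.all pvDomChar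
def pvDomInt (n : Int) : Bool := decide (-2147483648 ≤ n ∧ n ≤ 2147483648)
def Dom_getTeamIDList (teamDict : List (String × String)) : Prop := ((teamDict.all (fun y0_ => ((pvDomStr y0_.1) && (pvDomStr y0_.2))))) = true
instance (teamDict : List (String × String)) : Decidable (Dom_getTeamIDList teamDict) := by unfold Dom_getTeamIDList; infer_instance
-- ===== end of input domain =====

-- B replaces A's six separate filter-scans of the dict by one grouping pass into per-tier
-- buckets (objective: simpler/alternative; same return value everywhere).

-- ===== PORT A =====
def getKeysByValue (dictOfElements : List (String × String)) (valueToFind : String) : List String :=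
  dictOfElements.foldl
    (fun listOfKeys item => if item.2 == valueToFind then listOfKeys ++ [item.1] else listOfKeys) []

-- Python's counterDict.update({k: len}) always adds a FRESH key here (the five tier keys are
-- distinct literals and each is inserted at most once), so it is exactly an append.
def getTeamIDList (teamDict : List (String × String)) : List String × (List (String × Int)) :=
  let prem := getKeysByValue teamDict "Premiership"
  let high := getKeysByValue teamDict "High"
  let mid := getKeysByValue teamDict "Mid"
  let low := getKeysByValue teamDict "Low"
  let open_ := getKeysByValue teamDict "Open"
  let none_ := getKeysByValue teamDict ""
  let teamIDList : List String := []
  let counterDict : List (String × Int) := []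
  let teamIDList := if prem ≠ [] then prem.foldl (fun l ID => l ++ [ID]) teamIDList else teamIDList
  let counterDict := if prem ≠ [] then counterDict ++ [("Premiership", (prem.length : Int))] else counterDict
  let teamIDList := if high ≠ [] then high.foldl (fun l ID => l ++ [ID]) teamIDList else teamIDList
  let counterDict := if high ≠ [] then counterDict ++ [("High", (high.length : Int))] else counterDict
  let teamIDList := if mid ≠ [] then mid.foldl (fun l ID => l ++ [ID]) teamIDList else teamIDList
  let counterDict := if mid ≠ [] then counterDict ++ [("Mid", (mid.length : Int))] else counterDict
  let teamIDList := if low ≠ [] then low.foldl (fun l ID => l ++ [ID]) teamIDList else teamIDList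
  let counterDict := if low ≠ [] then counterDict ++ [("Low", (low.length : Int))] else counterDict
  let teamIDList := if open_ ≠ [] then open_.foldl (fun l ID => l ++ [ID]) teamIDList else teamIDList
  let counterDict := if open_ ≠ [] then counterDict ++ [("Open", (open_.length : Int))] else counterDict
  let teamIDList := if none_ ≠ [] then none_.foldl (fun l ID => l ++ [ID]) teamIDList else teamIDList
  (teamIDList, counterDict)

-- ===== PORT B =====
-- Source B's buckets dict has the six fixed keys "Premiership","High","Mid","Low","Open","";
-- it is ported as a 6-tuple of lists (one field per key); buckets.get(tier) is the if-chain.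
def pvBucketStep
    (b : List String × List String × List String × List String × List String × List String)
    (item : String × String) :
    List String × List String × List String × List String × List String × List String :=
  match b with
  | (p, h, m, l, o, n) =>
    if item.2 == "Premiership" then (p ++ [item.1], h, m, l, o, n)
    else if item.2 == "High" then (p, h ++ [item.1], m, l, o, n)
    else if item.2 == "Mid" then (p, h, m ++ [item.1], l, o, n)
    else if item.2 == "Low" then (p, h, m, l ++ [item.1], o, n)
    else if item.2 == "Open" then (p, h, m, l, o ++ [item.1], n)
    else if item.2 == "" then (p, h, m, l, o, n ++ [item.1])
    else (p, h, m, l, o, n)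

def getTeamIDList_alt (teamDict : List (String × String)) : List String × (List (String × Int)) :=
  match teamDict.foldl pvBucketStep ([], [], [], [], [], []) with
  | (p, h, m, l, o, n) =>
    (p ++ h ++ m ++ l ++ o ++ n,
     (if p ≠ [] then [("Premiership", (p.length : Int))] else []) ++
     (if h ≠ [] then [("High", (h.length : Int))] else []) ++
     (if m ≠ [] then [("Mid", (m.length : Int))] else []) ++
     (if l ≠ [] then [("Low", (l.length : Int))] else []) ++
     (if o ≠ [] then [("Open", (o.length : Int))] else []))

-- ===== PRECONDITION & SPEC =====
def Spec_getTeamIDList (teamDict : List (String × String)) (out : List String × (List (String × Int))) : Prop := out = getTeamIDList_alt teamDict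
instance (teamDict : List (String × String)) (out : List String × (List (String × Int))) : Decidable (Spec_getTeamIDList teamDict out) := by unfold Spec_getTeamIDList; infer_instance

-- ===== CLAIM (what is proved, stated in full; the proofs are below) =====
def Claim_equal_getTeamIDList : Prop := ∀ (teamDict : List (String × String)), Dom_getTeamIDList teamDict → Spec_getTeamIDList teamDict (getTeamIDList teamDict)

-- ===== LEMMAS AND PROOFS =====

theorem gkbv_acc (v : String) : ∀ (td : List (String × String)) (acc : List String),
    td.foldl (fun l it => if it.2 == v then l ++ [it.1] else l) acc
      = acc ++ getKeysByValue td v := by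
  intro td
  induction td with
  | nil => intro acc; simp [getKeysByValue]
  | cons hd tl ih =>
    intro acc
    show List.foldl _ (if (hd.2 == v) = true then acc ++ [hd.1] else acc) tl
        = acc ++ getKeysByValue (hd :: tl) v
    have hK : getKeysByValue (hd :: tl) v
        = List.foldl (fun l it => if it.2 == v then l ++ [it.1] else l)
            (if (hd.2 == v) = true then [hd.1] else []) tl := rfl
    by_cases hv : (hd.2 == v) = true
    · rw [if_pos hv, ih, hK, if_pos hv, ih, List.append_assoc]
    · rw [if_neg hv, ih, hK, if_neg hv, ih, List.nil_append]

theorem gkbv_cons (k v s : String) (td : List (String × String)) :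
    getKeysByValue ((k, v) :: td) s
      = (if v == s then [k] else []) ++ getKeysByValue td s := by
  have hK : getKeysByValue ((k, v) :: td) s
      = List.foldl (fun l it => if it.2 == s then l ++ [it.1] else l)
          (if (v == s) = true then [k] else []) td := rfl
  rw [hK, gkbv_acc]

theorem bucket_spec : ∀ (td : List (String × String))
    (p h m l o n : List String),
    td.foldl pvBucketStep (p, h, m, l, o, n)
      = (p ++ getKeysByValue td "Premiership",
         h ++ getKeysByValue td "High",
         m ++ getKeysByValue td "Mid",
         l ++ getKeysByValue td "Low",
         o ++ getKeysByValue td "Open",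
         n ++ getKeysByValue td "") := by
  intro td
  induction td with
  | nil => intro p h m l o n; simp [getKeysByValue]
  | cons hd tl ih =>
    intro p h m l o n
    obtain ⟨k, v⟩ := hd
    simp only [List.foldl_cons, pvBucketStep, gkbv_cons]
    split_ifs with h1 h2 h3 h4 h5 h6 <;>
      simp_all [List.append_assoc]

theorem foldl_snoc (xs acc : List String) :
    xs.foldl (fun l ID => l ++ [ID]) acc = acc ++ xs :=
  PySem.List.foldl_append_singleton xs acc

theorem ab_eq (td : List (String × String)) : getTeamIDList td = getTeamIDList_alt td := by
  unfold getTeamIDList getTeamIDList_alt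
  rw [bucket_spec]
  simp only [List.nil_append, foldl_snoc]
  split_ifs <;> simp_all [List.append_assoc]

-- ===== VERDICT (by name: the statement is the Claim_ definition above) =====
theorem getTeamIDList_spec : Claim_equal_getTeamIDList := by
  intro td _
  unfold Spec_getTeamIDList
  exact ab_eq td
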